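-- pv_equiv track=rewrite | github.com/spectrumTF/11I | papki/Alina/17 номер/309.py | f
-- ===== SOURCE A (Python) =====
-- def f(x):
--     c=0
--     c1=0
--     while x!=0:
--         if x%10%2==0:
--             c+=x%10
--         else: c1+=x%10
--         x//=10
--     return c>c1
-- ===== SOURCE B (Python) =====
-- def f(x):
--     def sums(y):
--         if y == 0:
--             return (0, 0)
--         e, o = sums(y // 10)
--         d = y % 10
--         return (e + d, o) if d % 2 == 0 else (e, o + d)
--     e, o = sums(x)
--     return e > o
-- ===== Notes on version B (the rewrite author's own statement) =====
-- stated objective: alternative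
-- what changed: Replaces the iterative while-loop with two running accumulators by a structural recursion on the digits that builds the (even-sum, odd-sum) pair bottom-up and compares once at the end.
import Mathlib
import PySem

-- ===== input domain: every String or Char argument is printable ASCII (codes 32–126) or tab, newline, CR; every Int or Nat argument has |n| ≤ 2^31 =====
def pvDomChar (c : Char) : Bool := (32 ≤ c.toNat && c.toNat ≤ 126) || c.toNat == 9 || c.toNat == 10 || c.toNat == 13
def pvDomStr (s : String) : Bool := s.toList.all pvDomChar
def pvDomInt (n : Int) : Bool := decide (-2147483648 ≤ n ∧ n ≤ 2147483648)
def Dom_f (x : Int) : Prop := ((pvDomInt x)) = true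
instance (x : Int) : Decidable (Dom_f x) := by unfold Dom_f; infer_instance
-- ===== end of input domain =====

-- B replaces A's single branching accumulation loop by a recursion returning the (even,odd) digit-sum pair (alternative decomposition, same cost).

-- ===== PORT A =====
-- A's while loop, transliterated with fuel (enough fuel under Pre_f; the loop diverges for x < 0, excluded by Pre_f)
def fLoopA : Nat → Int → Int → Int → Bool
  | 0, _, c, c1 => decide (c > c1)
  | n + 1, x, c, c1 =>
    if x = 0 then decide (c > c1)
    else
      if PySem.Int.mod (PySem.Int.mod x 10) 2 = 0 then
        fLoopA n (PySem.Int.floordiv x 10) (c + PySem.Int.mod x 10) c1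
      else
        fLoopA n (PySem.Int.floordiv x 10) c (c1 + PySem.Int.mod x 10)

def f (x : Int) : Bool := fLoopA (x.toNat + 1) x 0 0

-- ===== PORT B =====
-- B's recursive helper sums, transliterated with the same fuel convention
def fSumsB : Nat → Int → Int × Int
  | 0, _ => (0, 0)
  | n + 1, y =>
    if y = 0 then (0, 0)
    else
      let p := fSumsB n (PySem.Int.floordiv y 10)
      let d := PySem.Int.mod y 10
      if PySem.Int.mod d 2 = 0 then (p.1 + d, p.2) else (p.1, p.2 + d)

def f_alt (x : Int) : Bool :=
  let p := fSumsB (x.toNat + 1) x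
  decide (p.1 > p.2)

-- ===== PRECONDITION & SPEC =====
-- Pre_f excludes negative x, on which A's while loop never terminates (x//10 stays at -1).
def Pre_f (x : Int) : Prop := 0 ≤ x
instance (x : Int) : Decidable (Pre_f x) := by unfold Pre_f; infer_instance
def pvWitness_f : Int := (2468)
def Spec_f (x : Int) (out : Bool) : Prop := out = f_alt x
instance (x : Int) (out : Bool) : Decidable (Spec_f x out) := by unfold Spec_f; infer_instance

-- ===== CLAIM (what is proved, stated in full; the proofs are below) =====
def Claim_equal_f : Prop := ∀ (x : Int), Dom_f x → Pre_f x → Spec_f x (f x)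

-- ===== LEMMAS AND PROOFS =====
lemma fLoop_eq_sums (n : Nat) : ∀ (x c c1 : Int), 0 ≤ x →
    fLoopA n x c c1 = decide (c + (fSumsB n x).1 > c1 + (fSumsB n x).2) := by
  induction n with
  | zero => intro x c c1 _; simp [fLoopA, fSumsB]
  | succ n ih =>
    intro x c c1 hx
    by_cases h0 : x = 0
    · simp [fLoopA, fSumsB, h0]
    · have hx10 : 0 ≤ PySem.Int.floordiv x 10 := by
        rw [PySem.Int.floordiv_eq_ediv_of_pos (by norm_num)]
        exact Int.ediv_nonneg hx (by norm_num)
      by_cases he : PySem.Int.mod (PySem.Int.mod x 10) 2 = 0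
      · simp only [fLoopA, fSumsB, h0, he, ih _ _ _ hx10]
        simp only [if_true, if_false, decide_eq_decide]
        omega
      · simp only [fLoopA, fSumsB, h0, he, ih _ _ _ hx10]
        simp only [if_false, decide_eq_decide]
        omega

-- ===== VERDICT (by name: the statement is the Claim_ definition above) =====
theorem f_spec : Claim_equal_f := by
  intro x _ hx
  unfold Spec_f f f_alt
  rw [fLoop_eq_sums _ _ _ _ hx]
  simp
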